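-- pv_equiv track=rewrite | github.com/zhangziang/adventofcode2024 | 1/1.py | cal_two
-- ===== SOURCE A (Python) =====
-- def cal_two(one, two):
--     two_count = {}
--     for item in two:
--         if item in two_count:
--             two_count[item] += 1
--         else:
--             two_count[item] = 1
--     result = 0
--     for item in one:
--         if item in two_count:
--             result += item * two_count[item]
--     return result
-- ===== SOURCE B (Python) =====
-- def cal_two(one, two):
--     one_count = {}
--     for x in one:
--         one_count[x] = one_count.get(x, 0) + 1
--     two_count = {}
--     for x in two:
--         two_count[x] = two_count.get(x, 0) + 1
--     return sum(v * n * two_count.get(v, 0) for v, n in one_count.items())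
-- ===== Notes on version B (the rewrite author's own statement) =====
-- stated objective: alternative
-- what changed: B builds frequency tables for BOTH lists and sums v * count_one[v] * count_two[v] over the distinct values of `one`, instead of A's per-element pass over `one` against a single count table of `two`.
import Mathlib
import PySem

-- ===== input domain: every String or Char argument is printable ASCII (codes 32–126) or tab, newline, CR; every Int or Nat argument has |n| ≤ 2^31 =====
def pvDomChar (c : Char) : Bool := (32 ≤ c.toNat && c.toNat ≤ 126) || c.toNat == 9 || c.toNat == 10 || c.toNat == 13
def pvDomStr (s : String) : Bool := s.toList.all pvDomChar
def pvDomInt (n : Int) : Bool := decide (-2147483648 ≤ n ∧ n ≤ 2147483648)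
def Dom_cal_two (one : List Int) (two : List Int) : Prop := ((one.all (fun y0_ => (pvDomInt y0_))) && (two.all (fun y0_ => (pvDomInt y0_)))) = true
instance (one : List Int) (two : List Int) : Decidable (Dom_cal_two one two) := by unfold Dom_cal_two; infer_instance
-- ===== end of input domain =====

-- B replaces A's per-element pass over `one` with two frequency tables and a sum over
-- the distinct values of `one` (objective: alternative decomposition, same cost class).


-- ===== PORT A =====
def cal_two (one : List Int) (two : List Int) : Int :=
  let two_count : PySem.Dict Int Int :=
    two.foldl (fun d item =>
      if d.contains item then d.insert item (d.getD item 0 + 1) else d.insert item 1)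
      PySem.Dict.empty
  one.foldl (fun result item =>
    if two_count.contains item then result + item * two_count.getD item 0 else result) 0

-- ===== PORT B =====
def cal_two_alt (one : List Int) (two : List Int) : Int :=
  let one_count : PySem.Dict Int Int :=
    one.foldl (fun d x => d.insert x (d.getD x 0 + 1)) PySem.Dict.empty
  let two_count : PySem.Dict Int Int :=
    two.foldl (fun d x => d.insert x (d.getD x 0 + 1)) PySem.Dict.empty
  (one_count.items.map (fun p => p.1 * p.2 * two_count.getD p.1 0)).sum

-- ===== PRECONDITION & SPEC =====
def Spec_cal_two (one : List Int) (two : List Int) (out : Int) : Prop := out = cal_two_alt one two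
instance (one : List Int) (two : List Int) (out : Int) : Decidable (Spec_cal_two one two out) := by unfold Spec_cal_two; infer_instance

-- ===== CLAIM (what is proved, stated in full; the proofs are below) =====
def Claim_equal_cal_two : Prop := ∀ (one : List Int) (two : List Int), Dom_cal_two one two → Spec_cal_two one two (cal_two one two)

-- ===== LEMMAS AND PROOFS =====

-- summing 'if x = a then g x else 0' over a nodup list containing a gives g a
lemma sum_ite_single (S : List Int) (hS : S.Nodup) (a : Int) (g : Int → Int) (ha : a ∈ S) :
    (S.map (fun x => (if x = a then g x else 0 : Int))).sum = g a := by
  induction S with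
  | nil => cases ha
  | cons y t ih =>
    simp only [List.map_cons, List.sum_cons]
    rcases List.mem_cons.mp ha with h | h
    · subst h
      have hna : a ∉ t := (List.nodup_cons.mp hS).1
      have ht : t.map (fun x => (if x = a then g x else 0 : Int)) = t.map (fun _ => (0 : Int)) := by
        apply List.map_congr_left
        intro x hx
        have : x ≠ a := fun h => hna (h ▸ hx)
        simp [this]
      simp [ht]
    · have hya : y ≠ a := by rintro rfl; exact (List.nodup_cons.mp hS).1 h
      rw [if_neg hya, ih (List.nodup_cons.mp hS).2 h]
      ring

-- a sum over a list equals the count-weighted sum over its distinct values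
lemma sum_eq_weighted (l : List Int) (f : Int → Int) :
    (l.map f).sum = ((PySem.Set.ofList l).map (fun x => (l.count x : Int) * f x)).sum := by
  induction l using List.reverseRecOn with
  | nil => simp
  | append_singleton t a ih =>
    have hset : PySem.Set.ofList (t ++ [a]) = PySem.Set.add (PySem.Set.ofList t) a := by
      simp [PySem.Set.ofList_eq_foldl, List.foldl_append]
    have hcount : ∀ x : Int, ((t ++ [a]).count x : Int)
        = (t.count x : Int) + (if x = a then 1 else 0) := by
      intro x
      by_cases h : x = a
      · subst h; simp [List.count_append]
      · have h0 : List.count x [a] = 0 := List.count_eq_zero.mpr (by simp [h])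
        simp [List.count_append, h, h0]
    have hstep : ((PySem.Set.add (PySem.Set.ofList t) a).map
          (fun x => ((t ++ [a]).count x : Int) * f x)).sum
        = ((PySem.Set.add (PySem.Set.ofList t) a).map
          (fun x => (t.count x : Int) * f x + (if x = a then f x else 0))).sum := by
      congr 1
      apply List.map_congr_left
      intro x _
      rw [hcount x]
      by_cases h : x = a
      · simp [h]; ring
      · simp [h]
    rw [hset, hstep, List.map_append, List.sum_append, ih]
    by_cases hmem : a ∈ PySem.Set.ofList t
    · have hadd : PySem.Set.add (PySem.Set.ofList t) a = PySem.Set.ofList t := by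
        simp [PySem.Set.add, PySem.Set.contains, hmem]
      rw [hadd]
      rw [show ((PySem.Set.ofList t).map
            (fun x => (t.count x : Int) * f x + (if x = a then f x else 0))).sum
          = ((PySem.Set.ofList t).map (fun x => (t.count x : Int) * f x)).sum
            + ((PySem.Set.ofList t).map (fun x => (if x = a then f x else 0 : Int))).sum by
        rw [← List.sum_map_add]]
      rw [sum_ite_single _ (PySem.Set.nodup_ofList t) a f hmem]
      simp
    · have hadd : PySem.Set.add (PySem.Set.ofList t) a = PySem.Set.ofList t ++ [a] := by
        simp [PySem.Set.add, PySem.Set.contains, hmem]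
      have hna : a ∉ t := fun h => hmem ((PySem.Set.mem_ofList t a).mpr h)
      rw [hadd, List.map_append, List.sum_append]
      have h1 : ((PySem.Set.ofList t).map
            (fun x => (t.count x : Int) * f x + (if x = a then f x else 0))).sum
          = ((PySem.Set.ofList t).map (fun x => (t.count x : Int) * f x)).sum := by
        congr 1
        apply List.map_congr_left
        intro x hx
        have hxa : x ≠ a := fun h => hmem (h ▸ hx)
        simp [hxa]
      have h2 : (t.count a : Int) = 0 := by
        simp [List.count_eq_zero_of_not_mem hna]
      rw [h1]
      simp [h2]

-- ===== VERDICT (by name: the statement is the Claim_ definition above) =====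
theorem cal_two_spec : Claim_equal_cal_two := by
  intro one two _
  simp only [Spec_cal_two, cal_two, cal_two_alt]
  -- A's counting loop is the Counter fold
  have hA2 : (fun (d : PySem.Dict Int Int) (item : Int) =>
        if d.contains item then d.insert item (d.getD item 0 + 1) else d.insert item 1)
      = (fun (d : PySem.Dict Int Int) (x : Int) => d.insert x (d.getD x 0 + 1)) := by
    funext d x
    by_cases h : d.contains x
    · simp [h]
    · simp [h, PySem.Dict.getD_of_not_contains]
  rw [hA2, PySem.Dict.foldl_insert_getD_add_one_eq_counter,
      PySem.Dict.foldl_insert_getD_add_one_eq_counter (xs := one)]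
  -- A's summing loop adds item * two.count item (0 when item is absent from two)
  have hbody : (fun (result item : Int) =>
        if (PySem.Dict.counter two).contains item
        then result + item * (PySem.Dict.counter two).getD item 0 else result)
      = (fun result item => result + item * (two.count item : Int)) := by
    funext r x
    by_cases h : (PySem.Dict.counter two).contains x
    · simp [h, PySem.Dict.getD_counter]
    · have hx : x ∉ two := by
        intro hmem
        exact absurd (by simpa [PySem.Dict.contains_counter] using hmem) h
      simp [h, List.count_eq_zero_of_not_mem hx]
  rw [hbody, PySem.List.foldl_add (g := fun x => x * (two.count x : Int))]
  rw [PySem.Dict.items_counter]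
  rw [List.map_map]
  rw [sum_eq_weighted one (fun x => x * (two.count x : Int)), zero_add]
  congr 1
  apply List.map_congr_left
  intro x _
  simp [Function.comp, PySem.Dict.getD_counter]
  ring
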